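-- pv_equiv track=rewrite | github.com/phaquinosilva/axc-dt | comparators/n_bit/analysis/nbit_comparators.py | n_axdc6
-- ===== SOURCE A (Python) =====
-- def n_axdc6(a: int, b: int, n: int) -> int:
--     """Approximate Dedicated Comparator 6 (ADC6)"""
--     # formatting stuff
--     a = format(a, "#0%db" % (n + 2))[:1:-1]
--     b = format(b, "#0%db" % (n + 2))[:1:-1]
--     a = list(map(int, a))
--     b = list(map(int, b))
--     # compute xnors
--     n_2 = n // 2
--     n_4 = n // 4
--     eq = [0] * n
--
--     for i in range(n_2 + 1, n):
--         eq[i] = ~(a[i] ^ b[i]) & 1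
--
--     # compute greater for each bit
--     g = [0] * n
--     for i in range(n_2, n):
--         temp = 1
--         for k in range(i + 1, n):
--             temp &= eq[k]
--         g[i] = temp & a[i] & ~b[i]
--     # compute final comparison
--     greater = 0
--     for i in range(n_4, n_2):
--         greater |= ~b[i]
--     for i in range(n_2, n):
--         greater |= g[i]
--     return ~greater & 1
-- ===== SOURCE B (Python) =====
-- def n_axdc6(a: int, b: int, n: int) -> int:
--     """Approximate Dedicated Comparator 6 (ADC6) - single-pass version.
--
--     Reads bits straight off the integers with shifts (no string formatting,
--     no bit lists) and replaces the per-bit rescan of eq[] by one reverse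
--     pass that maintains a running suffix-equality flag: O(n) instead of O(n^2).
--     """
--     half, quarter = n // 2, n // 4
--     if any((b >> i) & 1 == 0 for i in range(quarter, half)):
--         return 0
--     eq_suffix = True
--     for i in range(n - 1, half - 1, -1):
--         if eq_suffix and (a >> i) & 1 == 1 and (b >> i) & 1 == 0:
--             return 0
--         if (a >> i) & 1 != (b >> i) & 1:
--             eq_suffix = False
--     return 1
-- ===== Notes on version B (the rewrite author's own statement) =====
-- stated objective: faster
-- what changed: B reads bits directly off the integers with shifts instead of formatting to padded binary strings, and replaces A's per-bit rescan of the eq[] suffix (and the g[]/greater arrays) by a single reverse pass that maintains a running suffix-equality flag with early exit.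
import Mathlib
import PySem

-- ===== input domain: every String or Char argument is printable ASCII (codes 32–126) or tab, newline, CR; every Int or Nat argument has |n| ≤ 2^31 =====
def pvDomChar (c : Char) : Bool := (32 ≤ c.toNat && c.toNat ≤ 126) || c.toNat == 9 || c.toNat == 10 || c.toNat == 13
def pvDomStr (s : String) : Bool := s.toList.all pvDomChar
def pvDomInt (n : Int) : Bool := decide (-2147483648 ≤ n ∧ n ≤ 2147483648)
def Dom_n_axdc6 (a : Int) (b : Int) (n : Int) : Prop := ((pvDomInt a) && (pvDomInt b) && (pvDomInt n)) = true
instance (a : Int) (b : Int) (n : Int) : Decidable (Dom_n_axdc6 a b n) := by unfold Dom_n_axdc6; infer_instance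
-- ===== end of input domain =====

-- B replaces A's per-bit rescan of eq[] by one reverse pass with a running suffix-equality
-- flag and reads bits with shifts instead of building bit lists: O(n) instead of O(n^2)
-- (measured faster). Proved equal to A on Pre_ (a, b ≥ 0, n ≥ -2; outside, A raises ValueError).

-- ===== PORT A =====
-- Hand port of the bits of format(x, "b") for x ≥ 0: most-significant digit first.
def pvBinDigits (m : Nat) : List Int :=
  if m = 0 then [] else pvBinDigits (m / 2) ++ [((m % 2 : Nat) : Int)]
decreasing_by exact Nat.div_lt_self (Nat.pos_of_ne_zero (by assumption)) (by omega)

-- Hand port (exact for x ≥ 0, the only inputs where A does not raise) of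
-- list(map(int, format(x, "#0%db" % (n + 2))[:1:-1])): the '0b' prefix is cut off by the
-- slice, the zero padding pads the digit part to width n, and [:1:-1] reverses.
def pvFmtBits (x : Int) (n : Int) : List Int :=
  let digits := if x.toNat = 0 then [(0 : Int)] else pvBinDigits x.toNat
  (List.replicate (n.toNat - digits.length) 0 ++ digits).reverse

-- literal port of A; list indexing a[i]/b[i]/eq[k]/g[i] is always in range here, so the
-- pyGetD default 0 is never used.
def n_axdc6 (a : Int) (b : Int) (n : Int) : Int :=
  let aB := pvFmtBits a n
  let bB := pvFmtBits b n
  let n2 := PySem.Int.floordiv n 2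
  let n4 := PySem.Int.floordiv n 4
  let eq := (PySem.List.pyRange (n2 + 1) n 1).foldl
    (fun e i => PySem.List.pySetD e i
      (PySem.Int.band (Int.not (PySem.Int.bxor (PySem.List.pyGetD aB i 0) (PySem.List.pyGetD bB i 0))) 1))
    (List.replicate n.toNat 0)
  let g := (PySem.List.pyRange n2 n 1).foldl
    (fun gl i =>
      let temp := (PySem.List.pyRange (i + 1) n 1).foldl
        (fun t k => PySem.Int.band t (PySem.List.pyGetD eq k 0)) 1
      PySem.List.pySetD gl i
        (PySem.Int.band (PySem.Int.band temp (PySem.List.pyGetD aB i 0)) (Int.not (PySem.List.pyGetD bB i 0))))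
    (List.replicate n.toNat 0)
  let greater := (PySem.List.pyRange n4 n2 1).foldl
    (fun gr i => PySem.Int.bor gr (Int.not (PySem.List.pyGetD bB i 0))) 0
  let greater := (PySem.List.pyRange n2 n 1).foldl
    (fun gr i => PySem.Int.bor gr (PySem.List.pyGetD g i 0)) greater
  PySem.Int.band (Int.not greater) 1

-- ===== PORT B =====
-- (x >> i) & 1; every call below has 0 ≤ i (under Pre_), so .toNat is exact.
def pvAltBit (x : Int) (i : Int) : Int := PySem.Int.band (x >>> i.toNat) 1

-- the reverse pass of Source B, carrying the running suffix-equality flag; returning 0 mirrors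
-- Source B's early `return 0`.
def pvAltLoop (a : Int) (b : Int) : List Int → Bool → Int
  | [], _ => 1
  | i :: rest, suf =>
    if suf && (pvAltBit a i == 1) && (pvAltBit b i == 0) then 0
    else pvAltLoop a b rest (if pvAltBit a i ≠ pvAltBit b i then false else suf)

def n_axdc6_alt (a : Int) (b : Int) (n : Int) : Int :=
  let half := PySem.Int.floordiv n 2
  let quarter := PySem.Int.floordiv n 4
  if (PySem.List.pyRange quarter half 1).any (fun i => pvAltBit b i == 0) then 0
  else pvAltLoop a b (PySem.List.pyRange (n - 1) (half - 1) (-1)) true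

-- ===== PRECONDITION & SPEC =====
-- A raises ValueError on a < 0 or b < 0 (the slice then keeps the 'b' of the sign-shifted
-- '-0b' prefix and int() fails) and on n < -2 (invalid format specifier); Pre_ excludes
-- exactly those inputs.
def Pre_n_axdc6 (a : Int) (b : Int) (n : Int) : Prop := 0 ≤ a ∧ 0 ≤ b ∧ -2 ≤ n
instance (a : Int) (b : Int) (n : Int) : Decidable (Pre_n_axdc6 a b n) := by
  unfold Pre_n_axdc6; infer_instance

def pvWitness_n_axdc6 : Int × Int × Int := (5, 3, 4)

def Spec_n_axdc6 (a : Int) (b : Int) (n : Int) (out : Int) : Prop := out = n_axdc6_alt a b n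
instance (a : Int) (b : Int) (n : Int) (out : Int) : Decidable (Spec_n_axdc6 a b n out) := by
  unfold Spec_n_axdc6; infer_instance

-- ===== CLAIM (what is proved, stated in full; the proofs are below) =====
def Claim_equal_n_axdc6 : Prop := ∀ (a : Int) (b : Int) (n : Int),
  Dom_n_axdc6 a b n → Pre_n_axdc6 a b n → Spec_n_axdc6 a b n (n_axdc6 a b n)

-- ===== LEMMAS AND PROOFS =====

-- bit i of x (x ≥ 0), the common abstraction both ports are reduced to
def pvBit (x : Int) (i : Int) : Int := (((x.toNat >>> i.toNat) % 2 : Nat) : Int)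

theorem pvBit01 (x i : Int) : pvBit x i = 0 ∨ pvBit x i = 1 := by
  unfold pvBit; omega

theorem pvBinDigits_getD (m : Nat) (i : Nat) :
    ((pvBinDigits m).reverse).getD i 0 = (((m >>> i) % 2 : Nat) : Int) := by
  induction m using Nat.strong_induction_on generalizing i with
  | _ m ih =>
    rw [pvBinDigits]
    by_cases hm : m = 0
    · simp [hm]
    · simp only [hm, if_false, List.reverse_append, List.reverse_singleton, List.singleton_append]
      cases i with
      | zero => simp
      | succ j =>
        rw [List.getD_cons_succ, ih (m / 2) (Nat.div_lt_self (by omega) (by omega)) j]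
        congr 1
        rw [Nat.shiftRight_succ_inside]

theorem pvGetD_append_replicate (l : List Int) (k i : Nat) :
    (l ++ List.replicate k 0).getD i 0 = l.getD i 0 := by
  rcases lt_or_ge i l.length with h | h
  · rw [List.getD_append _ _ _ _ h]
  · rw [List.getD_eq_default _ _ h]
    rcases lt_or_ge i (l.length + k) with h2 | h2
    · rw [List.getD_append_right _ _ _ _ h]
      simp only [List.getD, List.getElem?_replicate]
      rw [if_pos (by omega)]
      rfl
    · rw [List.getD_eq_default]
      simp; omega

theorem pvFmtBits_getD (x n : Int) (i : Nat) :
    PySem.List.pyGetD (pvFmtBits x n) (i : Int) 0 = pvBit x i := by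
  rw [PySem.List.pyGetD_natCast]
  unfold pvFmtBits pvBit
  simp only [Int.toNat_natCast, List.reverse_append, List.reverse_replicate]
  by_cases h0 : x.toNat = 0
  · simp only [h0, if_true]
    rw [pvGetD_append_replicate]
    cases i <;> simp
  · simp only [h0, if_false]
    rw [pvGetD_append_replicate, pvBinDigits_getD]

theorem pvAltBit_eq (x i : Int) (hx : 0 ≤ x) : pvAltBit x i = pvBit x i := by
  unfold pvAltBit
  have hxx : x = (x.toNat : Int) := (Int.toNat_of_nonneg hx).symm
  rw [hxx]
  rw [show ((x.toNat : Int) >>> i.toNat) = ((x.toNat >>> i.toNat : Nat) : Int) from by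
    exact_mod_cast Int.natCast_shiftRight x.toNat i.toNat]
  rw [show (1 : Int) = ((1 : Nat) : Int) from rfl, PySem.Int.band_natCast]
  unfold pvBit
  simp [Nat.and_one_is_mod]

theorem pvSetFold (f : Int → Int) (hi : Int) :
    ∀ (fuel : Nat) (lo : Int) (init : List Int), 0 ≤ lo → fuel = (hi - lo).toNat → ∀ j : Int, 0 ≤ j →
    PySem.List.pyGetD
      ((PySem.List.pyRange lo hi 1).foldl (fun e i => PySem.List.pySetD e i (f i)) init) j 0
    = if lo ≤ j ∧ j < hi ∧ j < (init.length : Int) then f j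
      else PySem.List.pyGetD init j 0 := by
  intro fuel
  induction fuel with
  | zero =>
    intro lo init hlo hf j hj
    rw [PySem.List.pyRange_one_eq_nil (by omega)]
    simp only [List.foldl_nil]
    rw [if_neg (by omega)]
  | succ m ih =>
    intro lo init hlo hf j hj
    rw [PySem.List.pyRange_one_cons (by omega)]
    simp only [List.foldl_cons]
    rw [ih (lo + 1) _ (by omega) (by omega) j hj]
    rw [PySem.List.pySetD_of_nonneg _ _ hlo]
    have hlen : ((init.set lo.toNat (f lo)).length : Int) = (init.length : Int) := by
      simp
    rw [hlen]
    have hjj : j = ((j.toNat : Nat) : Int) := by omega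
    by_cases hcase : j = lo
    · rw [if_neg (by omega)]
      by_cases hin : lo ≤ j ∧ j < hi ∧ j < (init.length : Int)
      · rw [if_pos hin]
        rw [hjj, PySem.List.pyGetD_natCast]
        simp only [List.getD]
        rw [List.getElem?_set]
        rw [if_pos (by omega), if_pos (by omega)]
        simp only [Option.getD_some]
        congr 1
        omega
      · rw [if_neg hin]
        rw [hjj, PySem.List.pyGetD_natCast, PySem.List.pyGetD_natCast]
        simp only [List.getD]
        rw [List.getElem?_set]
        by_cases hl : lo.toNat = j.toNat
        · rw [if_pos hl, if_neg (by omega)]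
          rw [List.getElem?_eq_none (by omega)]
        · rw [if_neg hl]
    · have : (lo + 1 ≤ j ∧ j < hi ∧ j < (init.length : Int)) ↔
          (lo ≤ j ∧ j < hi ∧ j < (init.length : Int)) := by omega
      rw [if_congr this rfl rfl]
      by_cases hin : lo ≤ j ∧ j < hi ∧ j < (init.length : Int)
      · rw [if_pos hin, if_pos hin]
      · rw [if_neg hin, if_neg hin]
        rw [hjj, PySem.List.pyGetD_natCast, PySem.List.pyGetD_natCast]
        simp only [List.getD]
        rw [List.getElem?_set, if_neg (by omega)]

theorem pvAndFold (v : Int → Int) :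
    ∀ (l : List Int) (t : Int), (∀ i ∈ l, v i = 0 ∨ v i = 1) → (t = 0 ∨ t = 1) →
    l.foldl (fun t k => PySem.Int.band t (v k)) t
      = if t = 1 ∧ l.all (fun i => v i == 1) = true then 1 else 0 := by
  intro l
  induction l with
  | nil =>
    intro t _ ht
    rcases ht with rfl | rfl <;> simp
  | cons i r ih =>
    intro t hv ht
    simp only [List.foldl_cons, List.all_cons, Bool.and_eq_true, beq_iff_eq]
    rcases hv i (by simp) with h0 | h1
    · rw [h0]
      have : PySem.Int.band t 0 = 0 := by rcases ht with rfl | rfl <;> decide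
      rw [this, ih _ (fun k hk => hv k (by simp [hk])) (Or.inl rfl)]
      rw [if_neg (by simp), if_neg (by omega)]
    · rw [h1]
      have : PySem.Int.band t 1 = t := by rcases ht with rfl | rfl <;> decide
      rw [this, ih _ (fun k hk => hv k (by simp [hk])) ht]
      by_cases hc : t = 1 ∧ (r.all fun i => v i == 1) = true
      · rw [if_pos hc, if_pos ⟨hc.1, by omega, hc.2⟩]
      · rw [if_neg hc, if_neg (by rintro ⟨x, y, z⟩; exact hc ⟨x, z⟩)]

-- the four values the `greater` accumulator can take
def pvS (x : Int) : Prop := x = 0 ∨ x = 1 ∨ x = -1 ∨ x = -2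

theorem pvOrStep (gr vv : Int) (h1 : pvS gr) (h2 : pvS vv) :
    pvS (PySem.Int.bor gr vv) ∧
    PySem.Int.band (PySem.Int.bor gr vv) 1
      = if PySem.Int.band gr 1 = 1 ∨ PySem.Int.band vv 1 = 1 then 1 else 0 := by
  unfold pvS at *
  rcases h1 with rfl|rfl|rfl|rfl <;> rcases h2 with rfl|rfl|rfl|rfl <;>
    exact ⟨by decide, by decide⟩

theorem pvOrFold (v : Int → Int) :
    ∀ (l : List Int) (gr : Int), (∀ i ∈ l, pvS (v i)) → pvS gr →
    pvS (l.foldl (fun g i => PySem.Int.bor g (v i)) gr) ∧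
    PySem.Int.band (l.foldl (fun g i => PySem.Int.bor g (v i)) gr) 1
      = if PySem.Int.band gr 1 = 1 ∨ ∃ i ∈ l, PySem.Int.band (v i) 1 = 1 then 1 else 0 := by
  intro l
  induction l with
  | nil =>
    intro gr _ hgr
    refine ⟨hgr, ?_⟩
    simp only [List.foldl_nil]
    by_cases h : PySem.Int.band gr 1 = 1
    · rw [if_pos (by tauto), h]
    · rw [if_neg (by rintro (h1 | ⟨i, hi, _⟩); exact h h1; simp at hi)]
      unfold pvS at hgr
      rcases hgr with rfl|rfl|rfl|rfl <;> first | rfl | (exfalso; exact h (by decide))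
  | cons i r ih =>
    intro gr hv hgr
    simp only [List.foldl_cons]
    obtain ⟨hS, hpar⟩ := pvOrStep gr (v i) hgr (hv i (by simp))
    obtain ⟨hS2, hpar2⟩ := ih _ (fun k hk => hv k (by simp [hk])) hS
    refine ⟨hS2, ?_⟩
    have hiff : PySem.Int.band (PySem.Int.bor gr (v i)) 1 = 1 ↔
        (PySem.Int.band gr 1 = 1 ∨ PySem.Int.band (v i) 1 = 1) := by
      rw [hpar]
      split_ifs with h
      · exact ⟨fun _ => h, fun _ => rfl⟩
      · constructor
        · intro h2; exact absurd h2 (by norm_num)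
        · intro h2; exact absurd h2 h
    rw [hpar2]
    apply if_congr _ rfl rfl
    rw [hiff]
    constructor
    · rintro ((h|h)|⟨k,hk,h⟩)
      exacts [Or.inl h, Or.inr ⟨i, by simp, h⟩, Or.inr ⟨k, by simp [hk], h⟩]
    · rintro (h|⟨k,hk,h⟩)
      · exact Or.inl (Or.inl h)
      · rcases List.mem_cons.mp hk with rfl|hk2
        · exact Or.inl (Or.inr h)
        · exact Or.inr ⟨k,hk2,h⟩

-- Bool mirror of pvAltLoop's decision
def pvHasW (a b : Int) : List Int → Bool → Bool
  | [], _ => false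
  | i :: r, suf =>
    (suf && (pvBit a i == 1) && (pvBit b i == 0)) || pvHasW a b r (suf && (pvBit a i == pvBit b i))

def pvAscW (a b : Int) : List Int → Bool
  | [] => false
  | i :: r =>
    ((pvBit a i == 1) && (pvBit b i == 0) && r.all (fun k => pvBit a k == pvBit b k)) || pvAscW a b r

theorem pvAltLoop_eq (a b : Int) (ha : 0 ≤ a) (hb : 0 ≤ b) :
    ∀ (l : List Int) (suf : Bool),
    pvAltLoop a b l suf = if pvHasW a b l suf then 0 else 1 := by
  intro l
  induction l with
  | nil => intro suf; simp [pvAltLoop, pvHasW]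
  | cons i r ih =>
    intro suf
    rw [pvAltLoop, pvHasW, pvAltBit_eq a i ha, pvAltBit_eq b i hb]
    by_cases hc : (suf && (pvBit a i == 1) && (pvBit b i == 0)) = true
    · rw [if_pos hc, hc, Bool.true_or, if_pos rfl]
    · rw [if_neg hc, Bool.not_eq_true] at *
      rw [hc, Bool.false_or, ih]
      congr 1
      by_cases he : pvBit a i = pvBit b i
      · simp [he]
      · rw [show (pvBit a i == pvBit b i) = false from by simp [he], Bool.and_false,
            if_pos he]

theorem pvHasW_append (a b : Int) (i : Int) :
    ∀ (xs : List Int) (suf : Bool),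
    pvHasW a b (xs ++ [i]) suf
      = (pvHasW a b xs suf ||
         (suf && xs.all (fun k => pvBit a k == pvBit b k) && ((pvBit a i == 1) && (pvBit b i == 0)))) := by
  intro xs
  induction xs with
  | nil => intro suf; cases suf <;> simp [pvHasW]
  | cons j r ih =>
    intro suf
    simp only [List.cons_append, pvHasW, ih, List.all_cons]
    cases suf <;> cases h1 : (pvBit a j == pvBit b j) <;> simp [Bool.or_assoc, Bool.and_assoc]

theorem pvHasW_reverse (a b : Int) :
    ∀ (l : List Int) (suf : Bool), pvHasW a b l.reverse suf = (suf && pvAscW a b l) := by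
  intro l
  induction l with
  | nil => intro suf; simp [pvHasW, pvAscW]
  | cons i r ih =>
    intro suf
    rw [List.reverse_cons, pvHasW_append, ih, pvAscW]
    rw [List.all_reverse]
    cases suf <;> cases h : pvAscW a b r <;>
      simp [Bool.and_assoc, Bool.or_comm, Bool.and_comm]

theorem pvAscW_iff' (a b n : Int) :
    ∀ (fuel : Nat) (lo : Int), fuel = (n - lo).toNat →
      (pvAscW a b (PySem.List.pyRange lo n 1) = true ↔
      ∃ i, lo ≤ i ∧ i < n ∧ pvBit a i = 1 ∧ pvBit b i = 0 ∧
        (PySem.List.pyRange (i + 1) n 1).all (fun k => pvBit a k == pvBit b k) = true) := by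
  intro fuel
  induction fuel with
  | zero =>
    intro lo hf
    rw [PySem.List.pyRange_one_eq_nil (by omega)]
    simp only [pvAscW]
    constructor
    · intro h; exact absurd h (by simp)
    · rintro ⟨i, h1, h2, _⟩; omega
  | succ m ih =>
    intro lo hf
    rw [PySem.List.pyRange_one_cons (by omega)]
    rw [pvAscW]
    rw [Bool.or_eq_true, ih (lo + 1) (by omega)]
    constructor
    · rintro (h | ⟨i, h1, h2, h3, h4, h5⟩)
      · simp only [Bool.and_eq_true, beq_iff_eq] at h
        exact ⟨lo, le_refl _, by omega, h.1.1, h.1.2, h.2⟩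
      · exact ⟨i, by omega, h2, h3, h4, h5⟩
    · rintro ⟨i, h1, h2, h3, h4, h5⟩
      by_cases hc : i = lo
      · subst hc
        left
        simp only [Bool.and_eq_true, beq_iff_eq]
        exact ⟨⟨h3, h4⟩, h5⟩
      · right
        exact ⟨i, by omega, h2, h3, h4, h5⟩

theorem pvAscW_iff (a b n : Int) (lo : Int) :
    pvAscW a b (PySem.List.pyRange lo n 1) = true ↔
      ∃ i, lo ≤ i ∧ i < n ∧ pvBit a i = 1 ∧ pvBit b i = 0 ∧
        (PySem.List.pyRange (i + 1) n 1).all (fun k => pvBit a k == pvBit b k) = true :=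
  pvAscW_iff' a b n (n - lo).toNat lo rfl

-- the common closed form both ports are shown to compute for 0 ≤ n
def pvCond (a b n : Int) : Prop :=
  (∃ i ∈ PySem.List.pyRange (n / 4) (n / 2) 1, pvBit b i = 0) ∨
  (∃ i ∈ PySem.List.pyRange (n / 2) n 1, pvBit a i = 1 ∧ pvBit b i = 0 ∧
    (PySem.List.pyRange (i + 1) n 1).all (fun k => pvBit a k == pvBit b k) = true)

theorem pvEqv (x y : Int) (hx : x = 0 ∨ x = 1) (hy : y = 0 ∨ y = 1) :
    (PySem.Int.band (Int.not (PySem.Int.bxor x y)) 1 = 0 ∨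
     PySem.Int.band (Int.not (PySem.Int.bxor x y)) 1 = 1) ∧
    (PySem.Int.band (Int.not (PySem.Int.bxor x y)) 1 = 1 ↔ x = y) := by
  rcases hx with rfl | rfl <;> rcases hy with rfl | rfl <;> refine ⟨by decide, by decide⟩

theorem pvGval (t x y : Int) (ht : t = 0 ∨ t = 1) (hx : x = 0 ∨ x = 1) (hy : y = 0 ∨ y = 1) :
    pvS (PySem.Int.band (PySem.Int.band t x) (Int.not y)) ∧
    (PySem.Int.band (PySem.Int.band (PySem.Int.band t x) (Int.not y)) 1 = 1 ↔
      (t = 1 ∧ x = 1 ∧ y = 0)) := by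
  rcases ht with rfl | rfl <;> rcases hx with rfl | rfl <;> rcases hy with rfl | rfl <;>
    exact ⟨by unfold pvS; decide, by decide⟩

theorem pvNotB (y : Int) (hy : y = 0 ∨ y = 1) :
    pvS (Int.not y) ∧ (PySem.Int.band (Int.not y) 1 = 1 ↔ y = 0) := by
  rcases hy with rfl | rfl <;> exact ⟨by unfold pvS; decide, by decide⟩

theorem pvNotPar (x : Int) (hx : pvS x) :
    PySem.Int.band (Int.not x) 1 = if PySem.Int.band x 1 = 1 then 0 else 1 := by
  unfold pvS at hx
  rcases hx with rfl | rfl | rfl | rfl <;> decide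

theorem pvA_closed (a b n : Int) (ha : 0 ≤ a) (hb : 0 ≤ b) (hn : 0 ≤ n) :
    n_axdc6 a b n = @ite _ (pvCond a b n) (Classical.propDecidable _) 0 1 := by
  simp only [n_axdc6]
  rw [PySem.Int.floordiv_eq_ediv_of_pos (by norm_num : (0:Int) < 2),
      PySem.Int.floordiv_eq_ediv_of_pos (by norm_num : (0:Int) < 4)]
  have haB : ∀ i : Int, 0 ≤ i →
      PySem.List.pyGetD (pvFmtBits a n) i 0 = pvBit a i := by
    intro i hi
    have h : i = ((i.toNat : Nat) : Int) := by omega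
    rw [h, pvFmtBits_getD]
  have hbB : ∀ i : Int, 0 ≤ i →
      PySem.List.pyGetD (pvFmtBits b n) i 0 = pvBit b i := by
    intro i hi
    have h : i = ((i.toNat : Nat) : Int) := by omega
    rw [h, pvFmtBits_getD]
  have hlen : (((List.replicate n.toNat (0:Int)).length : Nat) : Int) = n := by
    simp; omega
  -- the eq[] array lookups
  have heq : ∀ k : Int, n / 2 + 1 ≤ k → k < n →
      PySem.List.pyGetD ((PySem.List.pyRange (n / 2 + 1) n 1).foldl
        (fun e i => PySem.List.pySetD e i
          (PySem.Int.band (Int.not (PySem.Int.bxor (PySem.List.pyGetD (pvFmtBits a n) i 0)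
            (PySem.List.pyGetD (pvFmtBits b n) i 0))) 1))
        (List.replicate n.toNat 0)) k 0
      = PySem.Int.band (Int.not (PySem.Int.bxor (pvBit a k) (pvBit b k))) 1 := by
    intro k hk1 hk2
    have h0 : (0:Int) ≤ n / 2 + 1 := by omega
    rw [pvSetFold _ n _ _ _ h0 rfl k (by omega)]
    rw [if_pos ⟨hk1, hk2, by omega⟩, haB k (by omega), hbB k (by omega)]
  -- the g[] array lookups
  have hg : ∀ i : Int, n / 2 ≤ i → i < n →
      PySem.List.pyGetD ((PySem.List.pyRange (n / 2) n 1).foldl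
        (fun gl i => PySem.List.pySetD gl i
          (PySem.Int.band (PySem.Int.band
            ((PySem.List.pyRange (i + 1) n 1).foldl
              (fun t k => PySem.Int.band t
                (PySem.List.pyGetD ((PySem.List.pyRange (n / 2 + 1) n 1).foldl
                  (fun e i => PySem.List.pySetD e i
                    (PySem.Int.band (Int.not (PySem.Int.bxor (PySem.List.pyGetD (pvFmtBits a n) i 0)
                      (PySem.List.pyGetD (pvFmtBits b n) i 0))) 1))
                  (List.replicate n.toNat 0)) k 0)) 1)
            (PySem.List.pyGetD (pvFmtBits a n) i 0))
            (Int.not (PySem.List.pyGetD (pvFmtBits b n) i 0))))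
        (List.replicate n.toNat 0)) i 0
      = PySem.Int.band (PySem.Int.band
          (if (PySem.List.pyRange (i + 1) n 1).all (fun k => pvBit a k == pvBit b k) = true
            then 1 else 0)
          (pvBit a i)) (Int.not (pvBit b i)) := by
    intro i hi1 hi2
    have h0 : (0:Int) ≤ n / 2 := by omega
    rw [pvSetFold _ n _ _ _ h0 rfl i (by omega)]
    rw [if_pos ⟨hi1, hi2, by omega⟩, haB i (by omega), hbB i (by omega)]
    congr 1
    congr 1
    -- the temp fold over eq[]
    have hvals : ∀ k ∈ PySem.List.pyRange (i + 1) n 1,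
        PySem.List.pyGetD ((PySem.List.pyRange (n / 2 + 1) n 1).foldl
          (fun e i => PySem.List.pySetD e i
            (PySem.Int.band (Int.not (PySem.Int.bxor (PySem.List.pyGetD (pvFmtBits a n) i 0)
              (PySem.List.pyGetD (pvFmtBits b n) i 0))) 1))
          (List.replicate n.toNat 0)) k 0 = 0 ∨
        PySem.List.pyGetD ((PySem.List.pyRange (n / 2 + 1) n 1).foldl
          (fun e i => PySem.List.pySetD e i
            (PySem.Int.band (Int.not (PySem.Int.bxor (PySem.List.pyGetD (pvFmtBits a n) i 0)
              (PySem.List.pyGetD (pvFmtBits b n) i 0))) 1))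
          (List.replicate n.toNat 0)) k 0 = 1 := by
      intro k hk
      obtain ⟨hk1, hk2⟩ := PySem.List.mem_pyRange_one.mp hk
      rw [heq k (by omega) hk2]
      exact (pvEqv _ _ (pvBit01 a k) (pvBit01 b k)).1
    rw [pvAndFold _ _ 1 hvals (Or.inr rfl)]
    have hcond : ((1:Int) = 1 ∧ ((PySem.List.pyRange (i + 1) n 1).all fun k =>
        PySem.List.pyGetD ((PySem.List.pyRange (n / 2 + 1) n 1).foldl
          (fun e i => PySem.List.pySetD e i
            (PySem.Int.band (Int.not (PySem.Int.bxor (PySem.List.pyGetD (pvFmtBits a n) i 0)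
              (PySem.List.pyGetD (pvFmtBits b n) i 0))) 1))
          (List.replicate n.toNat 0)) k 0 == 1) = true) ↔
        ((PySem.List.pyRange (i + 1) n 1).all (fun k => pvBit a k == pvBit b k) = true) := by
      simp only [true_and, List.all_eq_true, beq_iff_eq]
      constructor
      · intro h k hk
        obtain ⟨hk1, hk2⟩ := PySem.List.mem_pyRange_one.mp hk
        have := h k hk
        rw [heq k (by omega) hk2] at this
        exact (pvEqv _ _ (pvBit01 a k) (pvBit01 b k)).2.mp this
      · intro h k hk
        obtain ⟨hk1, hk2⟩ := PySem.List.mem_pyRange_one.mp hk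
        rw [heq k (by omega) hk2]
        exact (pvEqv _ _ (pvBit01 a k) (pvBit01 b k)).2.mpr (h k hk)
    rw [if_congr hcond rfl rfl]
  -- first greater accumulation
  have hG1 := pvOrFold (fun i => Int.not (PySem.List.pyGetD (pvFmtBits b n) i 0))
    (PySem.List.pyRange (n / 4) (n / 2) 1) 0
    (by
      intro i hi
      obtain ⟨hi1, hi2⟩ := PySem.List.mem_pyRange_one.mp hi
      beta_reduce
      rw [hbB i (by omega)]
      exact (pvNotB _ (pvBit01 b i)).1)
    (by unfold pvS; tauto)
  have hG2 := pvOrFold (fun i =>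
      PySem.List.pyGetD ((PySem.List.pyRange (n / 2) n 1).foldl
        (fun gl i => PySem.List.pySetD gl i
          (PySem.Int.band (PySem.Int.band
            ((PySem.List.pyRange (i + 1) n 1).foldl
              (fun t k => PySem.Int.band t
                (PySem.List.pyGetD ((PySem.List.pyRange (n / 2 + 1) n 1).foldl
                  (fun e i => PySem.List.pySetD e i
                    (PySem.Int.band (Int.not (PySem.Int.bxor (PySem.List.pyGetD (pvFmtBits a n) i 0)
                      (PySem.List.pyGetD (pvFmtBits b n) i 0))) 1))
                  (List.replicate n.toNat 0)) k 0)) 1)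
            (PySem.List.pyGetD (pvFmtBits a n) i 0))
            (Int.not (PySem.List.pyGetD (pvFmtBits b n) i 0))))
        (List.replicate n.toNat 0)) i 0)
    (PySem.List.pyRange (n / 2) n 1) _
    (by
      intro i hi
      obtain ⟨hi1, hi2⟩ := PySem.List.mem_pyRange_one.mp hi
      beta_reduce
      rw [hg i hi1 hi2]
      exact (pvGval _ _ _ (by split_ifs <;> tauto) (pvBit01 a i) (pvBit01 b i)).1)
    hG1.1
  rw [pvNotPar _ hG2.1, hG2.2, hG1.2]
  have hiff1 : (∃ i ∈ PySem.List.pyRange (n / 4) (n / 2) 1,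
      PySem.Int.band ((fun i => Int.not (PySem.List.pyGetD (pvFmtBits b n) i 0)) i) 1 = 1) ↔
      (∃ i ∈ PySem.List.pyRange (n / 4) (n / 2) 1, pvBit b i = 0) := by
    constructor
    · rintro ⟨i, hi, h⟩
      obtain ⟨hi1, hi2⟩ := PySem.List.mem_pyRange_one.mp hi
      beta_reduce at h
      rw [hbB i (by omega)] at h
      exact ⟨i, hi, (pvNotB _ (pvBit01 b i)).2.mp h⟩
    · rintro ⟨i, hi, h⟩
      obtain ⟨hi1, hi2⟩ := PySem.List.mem_pyRange_one.mp hi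
      refine ⟨i, hi, ?_⟩
      simp only
      rw [hbB i (by omega)]
      exact (pvNotB _ (pvBit01 b i)).2.mpr h
  have hiff2 : (∃ i ∈ PySem.List.pyRange (n / 2) n 1,
      PySem.Int.band (PySem.List.pyGetD ((PySem.List.pyRange (n / 2) n 1).foldl
        (fun gl i => PySem.List.pySetD gl i
          (PySem.Int.band (PySem.Int.band
            ((PySem.List.pyRange (i + 1) n 1).foldl
              (fun t k => PySem.Int.band t
                (PySem.List.pyGetD ((PySem.List.pyRange (n / 2 + 1) n 1).foldl
                  (fun e i => PySem.List.pySetD e i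
                    (PySem.Int.band (Int.not (PySem.Int.bxor (PySem.List.pyGetD (pvFmtBits a n) i 0)
                      (PySem.List.pyGetD (pvFmtBits b n) i 0))) 1))
                  (List.replicate n.toNat 0)) k 0)) 1)
            (PySem.List.pyGetD (pvFmtBits a n) i 0))
            (Int.not (PySem.List.pyGetD (pvFmtBits b n) i 0))))
        (List.replicate n.toNat 0)) i 0) 1 = 1) ↔
      (∃ i ∈ PySem.List.pyRange (n / 2) n 1, pvBit a i = 1 ∧ pvBit b i = 0 ∧
        (PySem.List.pyRange (i + 1) n 1).all (fun k => pvBit a k == pvBit b k) = true) := by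
    constructor
    · rintro ⟨i, hi, h⟩
      obtain ⟨hi1, hi2⟩ := PySem.List.mem_pyRange_one.mp hi
      beta_reduce at h
      rw [hg i hi1 hi2] at h
      obtain ⟨h1, h2, h3⟩ := (pvGval _ _ _ (by split_ifs <;> tauto)
        (pvBit01 a i) (pvBit01 b i)).2.mp h
      refine ⟨i, hi, h2, h3, ?_⟩
      by_contra hcc
      rw [if_neg hcc] at h1
      exact absurd h1 (by norm_num)
    · rintro ⟨i, hi, h1, h2, h3⟩
      obtain ⟨hi1, hi2⟩ := PySem.List.mem_pyRange_one.mp hi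
      refine ⟨i, hi, ?_⟩
      rw [hg i hi1 hi2]
      exact (pvGval _ _ _ (by split_ifs <;> tauto) (pvBit01 a i) (pvBit01 b i)).2.mpr
        ⟨by rw [if_pos h3], h1, h2⟩
  beta_reduce
  unfold pvCond
  by_cases hc1 : (∃ i ∈ PySem.List.pyRange (n / 4) (n / 2) 1, pvBit b i = 0)
  · rw [if_pos (Or.inr (hiff1.mpr hc1)), if_pos (Or.inl hc1)]
    norm_num
  · by_cases hc2 : (∃ i ∈ PySem.List.pyRange (n / 2) n 1, pvBit a i = 1 ∧ pvBit b i = 0 ∧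
        (PySem.List.pyRange (i + 1) n 1).all (fun k => pvBit a k == pvBit b k) = true)
    · rw [if_pos (Or.inr (hiff2.mpr hc2)), if_pos (Or.inr hc2)]
      norm_num
    · have hP1 : ¬(PySem.Int.band (0:Int) 1 = 1 ∨
          ∃ i ∈ PySem.List.pyRange (n / 4) (n / 2) 1,
            PySem.Int.band (Int.not (PySem.List.pyGetD (pvFmtBits b n) i 0)) 1 = 1) := by
        rintro (h2 | h2)
        · exact absurd h2 (by decide)
        · exact hc1 (hiff1.mp h2)
      rw [if_neg hP1]
      rw [if_neg (fun h => (fun (h2 : ((0:Int) = 1) ∨ _) => h2.elim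
        (fun h3 => absurd h3 (by norm_num)) (fun h3 => hc2 (hiff2.mp h3))) h)]
      rw [if_neg (not_or_intro hc1 hc2)]
      norm_num

theorem pvB_closed (a b n : Int) (ha : 0 ≤ a) (hb : 0 ≤ b) (hn : 0 ≤ n) :
    n_axdc6_alt a b n = @ite _ (pvCond a b n) (Classical.propDecidable _) 0 1 := by
  simp only [n_axdc6_alt]
  rw [PySem.Int.floordiv_eq_ediv_of_pos (by norm_num : (0:Int) < 2),
      PySem.Int.floordiv_eq_ediv_of_pos (by norm_num : (0:Int) < 4)]
  have h1 : (PySem.List.pyRange (n / 4) (n / 2) 1).any (fun i => pvAltBit b i == 0) = true ↔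
      (∃ i ∈ PySem.List.pyRange (n / 4) (n / 2) 1, pvBit b i = 0) := by
    rw [List.any_eq_true]
    constructor
    · rintro ⟨i, hi, hp⟩
      exact ⟨i, hi, by rwa [pvAltBit_eq b i hb, beq_iff_eq] at hp⟩
    · rintro ⟨i, hi, hp⟩
      refine ⟨i, hi, ?_⟩
      rw [pvAltBit_eq b i hb, beq_iff_eq]
      exact hp
  have h2 : PySem.List.pyRange (n - 1) (n / 2 - 1) (-1) = (PySem.List.pyRange (n / 2) n 1).reverse := by
    rw [PySem.List.pyRange_neg_one_eq_reverse]
    norm_num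
  have h3 : pvAscW a b (PySem.List.pyRange (n / 2) n 1) = true ↔
      (∃ i ∈ PySem.List.pyRange (n / 2) n 1, pvBit a i = 1 ∧ pvBit b i = 0 ∧
        (PySem.List.pyRange (i + 1) n 1).all (fun k => pvBit a k == pvBit b k) = true) := by
    rw [pvAscW_iff]
    constructor
    · rintro ⟨i, hi1, hi2, rest⟩
      exact ⟨i, PySem.List.mem_pyRange_one.mpr ⟨hi1, hi2⟩, rest⟩
    · rintro ⟨i, hm, rest⟩
      obtain ⟨hi1, hi2⟩ := PySem.List.mem_pyRange_one.mp hm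
      exact ⟨i, hi1, hi2, rest⟩
  unfold pvCond
  by_cases hc1 : (PySem.List.pyRange (n / 4) (n / 2) 1).any (fun i => pvAltBit b i == 0) = true
  · rw [if_pos hc1, if_pos (Or.inl (h1.mp hc1))]
  · rw [if_neg hc1, h2, pvAltLoop_eq a b ha hb, pvHasW_reverse, Bool.true_and]
    by_cases hasc : pvAscW a b (PySem.List.pyRange (n / 2) n 1) = true
    · rw [if_pos hasc, if_pos (Or.inr (h3.mp hasc))]
    · rw [if_neg hasc, if_neg ?_]
      rintro (hx | hx)
      · exact hc1 (h1.mpr hx)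
      · exact hasc (h3.mpr hx)

-- ===== VERDICT (by name: the statement is the Claim_ definition above) =====
theorem n_axdc6_spec : Claim_equal_n_axdc6 := by
  intro a b n _ hpre
  obtain ⟨ha, hb, hn⟩ := hpre
  unfold Spec_n_axdc6
  rcases lt_or_ge n 0 with hneg | hpos
  · interval_cases n <;>
      simp [n_axdc6, n_axdc6_alt, pvAltLoop,
        show PySem.Int.floordiv (-1) 2 = -1 from by decide,
        show PySem.Int.floordiv (-1) 4 = -1 from by decide,
        show PySem.Int.floordiv (-2) 2 = -1 from by decide,
        show PySem.Int.floordiv (-2) 4 = -1 from by decide,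
        show PySem.List.pyRange 0 (-1) 1 = [] from by decide,
        show PySem.List.pyRange 0 (-2) 1 = [] from by decide,
        show PySem.List.pyRange (-1) (-1) 1 = [] from by decide,
        show PySem.List.pyRange (-1) (-2) 1 = [] from by decide,
        show PySem.List.pyRange (-2) (-2) (-1) = [] from by decide,
        show PySem.List.pyRange (-3) (-2) (-1) = [] from by decide,
        show PySem.Int.band (Int.not 0) 1 = 1 from by decide]
  · rw [pvA_closed a b n ha hb hpos, pvB_closed a b n ha hb hpos]
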